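-- pv_equiv track=rewrite | github.com/Prakashsoni12/Python_command_games | NumberSeries_game.py | add_odd_pattrns
-- ===== SOURCE A (Python) =====
-- def add_odd_pattrns(n):
--     pattern_list = []
--     x = 2
--     odd_list = [i for i in range(1,n*2+1) if i%2==1]
--     for i in range(1,n+1):
--         pattern_list.append(x)
--         x = x + odd_list[i-1]
--     return pattern_list
-- ===== SOURCE B (Python) =====
-- def add_odd_pattrns(n):
--     # closed form: the (i+1)-th term is 2 plus the sum of the first i odd numbers, i.e. 2 + i*i
--     return [2 + i * i for i in range(n)]
-- ===== Notes on version B (the rewrite author's own statement) =====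
-- stated objective: simpler
-- what changed: Replaces the accumulator loop over a precomputed odd-number list with the closed form 2 + i*i (sum of the first i odd numbers is i^2), a single comprehension with no running state.
import Mathlib
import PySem

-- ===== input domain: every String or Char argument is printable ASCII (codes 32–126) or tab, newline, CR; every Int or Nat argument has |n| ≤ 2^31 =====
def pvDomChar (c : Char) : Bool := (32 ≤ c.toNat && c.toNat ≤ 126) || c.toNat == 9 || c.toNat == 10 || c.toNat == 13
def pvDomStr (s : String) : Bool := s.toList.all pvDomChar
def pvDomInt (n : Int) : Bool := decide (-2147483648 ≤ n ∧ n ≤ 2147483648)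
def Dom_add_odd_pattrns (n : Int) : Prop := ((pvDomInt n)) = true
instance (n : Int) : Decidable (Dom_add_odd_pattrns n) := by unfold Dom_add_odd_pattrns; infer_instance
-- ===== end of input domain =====

-- B replaces A's running-sum loop over a precomputed odd-number list with the closed form 2 + i*i (simpler).

-- ===== PORT A =====
-- odd_list[i-1] in A is always in range (1 ≤ i ≤ n, odd_list has n elements), so pyGetD's default never fires.
def add_odd_pattrns (n : Int) : List Int :=
  let odd_list := (PySem.List.pyRange 1 (n * 2 + 1) 1).filter (fun i => PySem.Int.mod i 2 == 1)
  ((PySem.List.pyRange 1 (n + 1) 1).foldl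
    (fun (st : List Int × Int) i => (st.1 ++ [st.2], st.2 + PySem.List.pyGetD odd_list (i - 1) 0))
    ([], 2)).1

-- ===== PORT B =====
def add_odd_pattrns_alt (n : Int) : List Int :=
  (PySem.List.pyRange 0 n 1).map (fun i => 2 + i * i)

-- ===== PRECONDITION & SPEC =====
def Spec_add_odd_pattrns (n : Int) (out : List Int) : Prop := out = add_odd_pattrns_alt n
instance (n : Int) (out : List Int) : Decidable (Spec_add_odd_pattrns n out) := by unfold Spec_add_odd_pattrns; infer_instance

-- ===== CLAIM (what is proved, stated in full; the proofs are below) =====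
def Claim_equal_add_odd_pattrns : Prop := ∀ (n : Int), Dom_add_odd_pattrns n → Spec_add_odd_pattrns n (add_odd_pattrns n)

-- ===== LEMMAS AND PROOFS =====

-- A's odd_list is the first m odd numbers.
theorem odd_filter (m : Nat) :
    (PySem.List.pyRange 1 (2 * (m : Int) + 1) 1).filter (fun i => PySem.Int.mod i 2 == 1)
      = (List.range m).map (fun (k : Nat) => 2 * (k : Int) + 1) := by
  induction m with
  | zero => simp [PySem.List.pyRange_one_eq_nil]
  | succ m ih =>
    have h1 : (2 * ((m + 1 : Nat) : Int) + 1) = (2 * (m : Int) + 1) + 1 + 1 := by push_cast; ring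
    rw [h1, PySem.List.pyRange_one_succ_right (by omega), PySem.List.pyRange_one_succ_right (by omega)]
    rw [List.filter_append, List.filter_append, ih]
    have heven : (((2 * (m : Int) + 1 + 1) % 2) == 1) = false := by
      simp only [beq_eq_false_iff_ne, ne_eq]; omega
    simp [List.range_succ, List.filter, PySem.Int.mod_eq_emod_of_pos, heven]

-- loop invariant: after j iterations the list is the first j closed-form terms and x = 2 + j².
theorem loop_lemma (L : List Int) (m : Nat)
    (hL : ∀ k : Nat, k < m → PySem.List.pyGetD L (k : Int) 0 = 2 * (k : Int) + 1)
    (j : Nat) (hj : j ≤ m) :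
    (PySem.List.pyRange 1 ((j : Int) + 1) 1).foldl
      (fun (st : List Int × Int) i => (st.1 ++ [st.2], st.2 + PySem.List.pyGetD L (i - 1) 0))
      ([], 2)
      = ((List.range j).map (fun (k : Nat) => 2 + (k : Int) * k), 2 + (j : Int) * j) := by
  induction j with
  | zero => simp [PySem.List.pyRange_one_eq_nil]
  | succ j ih =>
    have h1 : (((j + 1 : Nat) : Int) + 1) = ((j : Int) + 1) + 1 := by push_cast; ring
    rw [h1, PySem.List.pyRange_one_succ_right (by omega), List.foldl_append,
      ih (by omega)]
    have hg : PySem.List.pyGetD L ((j : Int) + 1 - 1) 0 = 2 * (j : Int) + 1 := by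
      have := hL j (by omega)
      simpa using this
    simp only [List.foldl_cons, List.foldl_nil, hg, List.range_succ, List.map_append]
    refine Prod.ext ?_ ?_
    · simp
    · push_cast; ring

theorem range_map_eq (n : Int) :
    (PySem.List.pyRange 0 n 1).map (fun i => 2 + i * i)
      = (List.range n.toNat).map (fun (k : Nat) => 2 + (k : Int) * k) := by
  rw [PySem.List.pyRange_one]
  simp [List.map_map, Function.comp_def]

-- ===== VERDICT (by name: the statement is the Claim_ definition above) =====
theorem add_odd_pattrns_spec : Claim_equal_add_odd_pattrns := by
  intro n _
  show add_odd_pattrns n = add_odd_pattrns_alt n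
  unfold add_odd_pattrns add_odd_pattrns_alt
  by_cases hn : n ≤ 0
  · rw [PySem.List.pyRange_one_eq_nil (by omega : n + 1 ≤ 1),
      PySem.List.pyRange_one_eq_nil (by omega : n ≤ 0)]
    simp
  · rw [not_le] at hn
    set m := n.toNat with hm
    have hcast : n = (m : Int) := by omega
    have hodd : (PySem.List.pyRange 1 (n * 2 + 1) 1).filter (fun i => PySem.Int.mod i 2 == 1)
        = (List.range m).map (fun (k : Nat) => 2 * (k : Int) + 1) := by
      rw [hcast, show ((m : Int) * 2 + 1) = 2 * (m : Int) + 1 by ring]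
      exact odd_filter m
    have hL : ∀ k : Nat, k < m →
        PySem.List.pyGetD ((List.range m).map (fun (k : Nat) => 2 * (k : Int) + 1)) (k : Int) 0
          = 2 * (k : Int) + 1 := by
      intro k hk
      rw [PySem.List.pyGetD_natCast]
      simp [List.getD_eq_getElem?_getD, hk]
    simp only [hodd]
    rw [show n + 1 = (m : Int) + 1 by omega, loop_lemma _ m hL m le_rfl,
      show n = (m : Int) from hcast, range_map_eq _]
    simp
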